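-- pv_equiv track=rewrite | github.com/jianningzhuang/CS1010X-Programming_Methodology | Final Exam/TH2020-q1-q2-q4-skeleton.py | fun_itr
-- ===== SOURCE A (Python) =====
-- def fun_itr(n, m):
--     result = 0
--     while n > 0:
--         result += 1
--         if n%m == 0:
--             n = (n-1)//m
--         else:
--             n -= 1
--     return result
-- ===== SOURCE B (Python) =====
-- def fun_itr(n, m):
--     # Batched: each outer iteration adds the whole run of n % |m| single
--     # decrements at once, then (if anything remains) takes one divide step.
--     k = abs(m)
--     steps = 0
--     while n > 0:
--         r = n % k
--         steps += r
--         n -= r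
--         if n > 0:
--             steps += 1
--             n = (n - 1) // m
--     return steps
-- ===== Notes on version B (the rewrite author's own statement) =====
-- stated objective: faster
-- what changed: B collapses each run of single-decrement iterations into one batch step (add n % |m| at once) and fuses it with the following divide step into a single loop iteration, so only O(log_|m| n) iterations remain.
-- outside the precondition, e.g. on fun_itr(5, 0): A raises ZeroDivisionError, B raises ZeroDivisionError
import Mathlib
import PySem

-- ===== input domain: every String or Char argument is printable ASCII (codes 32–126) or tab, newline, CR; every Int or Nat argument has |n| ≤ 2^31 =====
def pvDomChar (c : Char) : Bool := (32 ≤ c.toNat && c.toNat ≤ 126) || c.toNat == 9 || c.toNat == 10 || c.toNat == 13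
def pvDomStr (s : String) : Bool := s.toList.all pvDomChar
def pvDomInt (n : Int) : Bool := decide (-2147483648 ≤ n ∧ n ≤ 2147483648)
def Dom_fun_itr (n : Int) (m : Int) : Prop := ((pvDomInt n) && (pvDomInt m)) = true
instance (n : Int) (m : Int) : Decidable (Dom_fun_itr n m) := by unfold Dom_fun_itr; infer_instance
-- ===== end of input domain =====

-- B batches each run of n % |m| single decrements into one step and fuses it with the
-- following divide step into a single loop iteration (asymptotically faster in a timing run).

-- termination helper for the divide step (n := (n-1)//m), cited by both ports
theorem pvFdivDec (n m : Int) (hn : 0 < n) :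
    (PySem.Int.floordiv (n - 1) m).toNat < n.toNat := by
  have hle : PySem.Int.floordiv (n - 1) m ≤ n - 1 := by
    unfold PySem.Int.floordiv
    rcases lt_trichotomy m 0 with hm | hm | hm
    · have := Int.fdiv_nonpos_of_nonneg_of_nonpos (a := n - 1) (b := m) (by omega) (le_of_lt hm)
      omega
    · simp [hm]; omega
    · have h1 : (n - 1).fdiv m = (n - 1) / m - if 0 ≤ m ∨ m ∣ (n - 1) then 0 else 1 :=
        Int.fdiv_eq_ediv
      have h2 : (n - 1) / m ≤ n - 1 := Int.ediv_le_self m (by omega)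
      rw [h1]; split <;> omega
  omega

-- ===== PORT A =====
-- while n > 0: result += 1; if n % m == 0: n = (n-1)//m else: n -= 1
def fun_itr.loop (m n result : Int) : Int :=
  if 0 < n then
    if PySem.Int.mod n m = 0 then
      fun_itr.loop m (PySem.Int.floordiv (n - 1) m) (result + 1)
    else
      fun_itr.loop m (n - 1) (result + 1)
  else result
termination_by n.toNat
decreasing_by
  · exact pvFdivDec n m (by omega)
  · omega

def fun_itr (n : Int) (m : Int) : Int := fun_itr.loop m n 0

-- ===== PORT B =====
-- k = abs(m)
-- while n > 0: r = n % k; steps += r; n -= r; if n > 0: steps += 1; n = (n-1)//m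
-- (inside the loop n > 0 and k ≥ 0, so Python's `n % k` is Lean's `%` (emod) there)
def fun_itr_alt.go (m k n steps : Int) : Int :=
  if 0 < n then
    let r := n % k
    let steps' := steps + r
    let n' := n - r
    if 0 < n' then
      fun_itr_alt.go m k (PySem.Int.floordiv (n' - 1) m) (steps' + 1)
    else steps'
  else steps
termination_by n.toNat
decreasing_by
  rename_i hn hn'
  have hn2 : 0 < n - n % k := hn'
  have hk : k ≠ 0 := by
    intro h; rw [h, Int.emod_zero] at hn2; omega
  have hr0 : 0 ≤ n % k := Int.emod_nonneg n hk
  have := pvFdivDec (n - n % k) m hn2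
  omega

def fun_itr_alt (n : Int) (m : Int) : Int := fun_itr_alt.go m (m.natAbs : Int) n 0

-- ===== PRECONDITION & SPEC =====
-- Pre_ excludes exactly m = 0 with n > 0, where Python A (and B) raise ZeroDivisionError.
def Pre_fun_itr (n : Int) (m : Int) : Prop := n ≤ 0 ∨ m ≠ 0
instance (n : Int) (m : Int) : Decidable (Pre_fun_itr n m) := by unfold Pre_fun_itr; infer_instance
def pvWitness_fun_itr : Int × Int := (100, 7)

def Spec_fun_itr (n : Int) (m : Int) (out : Int) : Prop := out = fun_itr_alt n m
instance (n : Int) (m : Int) (out : Int) : Decidable (Spec_fun_itr n m out) := by unfold Spec_fun_itr; infer_instance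

-- ===== CLAIM (what is proved, stated in full; the proofs are below) =====
def Claim_equal_fun_itr : Prop := ∀ (n : Int) (m : Int), Dom_fun_itr n m → Pre_fun_itr n m → Spec_fun_itr n m (fun_itr n m)

-- ===== LEMMAS AND PROOFS =====

-- one-step unfolding of B's loop with the let-bindings reduced
theorem go_unfold (m k n steps : Int) :
    fun_itr_alt.go m k n steps =
      if 0 < n then
        if 0 < n - n % k then
          fun_itr_alt.go m k (PySem.Int.floordiv (n - n % k - 1) m) (steps + n % k + 1)
        else steps + n % k
      else steps := by
  rw [fun_itr_alt.go.eq_def]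

-- A's mod-by-m test fires iff the remainder mod |m| is zero
theorem pv_mod_abs_zero (n m : Int) :
    (PySem.Int.mod n m = 0) ↔ (PySem.Int.mod n (m.natAbs : Int) = 0) := by
  rw [PySem.Int.mod_eq_zero_iff_dvd, PySem.Int.mod_eq_zero_iff_dvd, Int.natAbs_dvd]

-- A performs j = n % |m| single decrements in a row
theorem pv_dec_run (m : Int) (hm : m ≠ 0) :
    ∀ (j : Nat) (n res : Int), (j : Int) ≤ n →
      PySem.Int.mod n (m.natAbs : Int) = (j : Int) →
      fun_itr.loop m n res = fun_itr.loop m (n - (j : Int)) (res + (j : Int)) := by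
  intro j
  induction j with
  | zero => intro n res _ _; simp
  | succ j ih =>
    intro n res hle hmod
    have hk : 0 < (m.natAbs : Int) := by
      have := Int.natAbs_pos.mpr hm; exact_mod_cast this
    have hn : 0 < n := by push_cast at hle; omega
    have hne : PySem.Int.mod n m ≠ 0 := by
      intro hc
      rw [pv_mod_abs_zero n m, hmod] at hc
      push_cast at hc; omega
    rw [fun_itr.loop, if_pos hn, if_neg hne]
    have hjlt : ((j : Int) + 1) < (m.natAbs : Int) := by
      have h2 := Int.emod_lt_of_pos n hk
      have h3 : n % ((m.natAbs : Int)) = (j : Int) + 1 := by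
        rw [← PySem.Int.mod_eq_emod_of_pos hk, hmod]; push_cast; ring
      omega
    have hmod' : PySem.Int.mod (n - 1) (m.natAbs : Int) = (j : Int) := by
      rw [PySem.Int.mod_eq_emod_of_pos hk]
      rw [PySem.Int.mod_eq_emod_of_pos hk] at hmod
      have h1 : (1 : Int) % (m.natAbs : Int) = 1 := Int.emod_eq_of_lt (by omega) (by omega)
      rw [Int.sub_emod, hmod, h1]
      have hc : ((j + 1 : Nat) : Int) - 1 = (j : Int) := by push_cast; ring
      rw [hc]
      apply Int.emod_eq_of_lt <;> omega
    have := ih (n - 1) (res + 1) (by push_cast at hle ⊢; omega) hmod'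
    rw [this]
    push_cast
    ring_nf

-- A's loop, from any state, equals B's fused loop (m ≠ 0)
theorem pv_loops_eq (m : Int) (hm : m ≠ 0) :
    ∀ (fuel : Nat) (n res : Int), n.toNat ≤ fuel →
      fun_itr.loop m n res = fun_itr_alt.go m (m.natAbs : Int) n res := by
  intro fuel
  induction fuel with
  | zero =>
    intro n res hf
    have hn : ¬ 0 < n := by omega
    rw [fun_itr.loop, go_unfold, if_neg hn, if_neg hn]
  | succ fuel ih =>
    intro n res hf
    by_cases hn : 0 < n
    · have hk : 0 < (m.natAbs : Int) := by
        have := Int.natAbs_pos.mpr hm; exact_mod_cast this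
      set r := n % (m.natAbs : Int) with hr
      have hr0 : 0 ≤ r := Int.emod_nonneg n (by omega)
      have hrlt : r < (m.natAbs : Int) := Int.emod_lt_of_pos n hk
      have hrle : r ≤ n := by
        have h4 := Int.emod_add_mul_ediv n ((m.natAbs : Int))
        have h5 : 0 ≤ ((m.natAbs : Int)) * (n / (m.natAbs : Int)) :=
          mul_nonneg (by omega) (Int.ediv_nonneg (by omega) (by omega))
        omega
      have hpys : PySem.Int.mod n (m.natAbs : Int) = r := by
        rw [PySem.Int.mod_eq_emod_of_pos hk, hr]
      -- step 1: A performs the r single decrements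
      have hjr : ((r.toNat : Int)) = r := Int.toNat_of_nonneg hr0
      have hbatch := pv_dec_run m hm r.toNat n res (by omega) (by rw [hjr, hpys])
      rw [hjr] at hbatch
      -- step 2: compare the remaining states
      have hdvd : (m.natAbs : Int) ∣ (n - r) := by
        have h4 := Int.emod_add_mul_ediv n ((m.natAbs : Int))
        exact ⟨n / (m.natAbs : Int), by omega⟩
      rw [hbatch, go_unfold, if_pos hn]
      simp only [← hr]
      by_cases hn' : 0 < n - r
      · -- one divide step on both sides, then the induction hypothesis
        have hA : PySem.Int.mod (n - r) m = 0 := by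
          rw [pv_mod_abs_zero, PySem.Int.mod_eq_zero_iff_dvd]
          exact hdvd
        rw [if_pos hn', fun_itr.loop, if_pos hn', if_pos hA]
        have := ih (PySem.Int.floordiv (n - r - 1) m) (res + r + 1)
          (by have := pvFdivDec (n - r) m hn'; omega)
        rw [← this]
      · -- both loops stop at n - r = 0
        rw [if_neg hn', fun_itr.loop, if_neg hn']
    · rw [fun_itr.loop, go_unfold, if_neg hn, if_neg hn]

-- ===== VERDICT (by name: the statement is the Claim_ definition above) =====
theorem fun_itr_spec : Claim_equal_fun_itr := by
  intro n m _ hpre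
  unfold Spec_fun_itr fun_itr fun_itr_alt
  rcases hpre with hn | hm
  · rw [fun_itr.loop, go_unfold, if_neg (by omega), if_neg (by omega)]
  · exact pv_loops_eq m hm n.toNat n 0 le_rfl
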